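-- pv_equiv track=rewrite | github.com/eth-infinitism/verkle-gas-estimator | verkle-gas-estimator.py | calculate_gas_effect
-- ===== SOURCE A (Python) =====
-- HEADER_STORAGE_OFFSET = 64
--
-- CODE_OFFSET = 128
--
-- VERKLE_NODE_WIDTH = 256
--
-- MAIN_STORAGE_OFFSET = 256 ** 31
--
-- WITNESS_BRANCH_COST = 1900
--
-- WITNESS_CHUNK_COST = 200
--
-- def calculate_gas_effect(contract_chunks, contract_slots):
--     code_cost = 0
--     # code_cost -= COLD_ACCOUNT_ACCESS_COST  # uncomment if Verkle replaces EIP-2929 warm/cold gas pricing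
--     storage_cost = 0
--     branches_access_events = {0: True}  # consider "main code" cost to be free
--     for [contract_chunk, _] in contract_chunks.items():
--         code_cost += WITNESS_CHUNK_COST
--         branch_id = contract_chunk // 256
--         if branch_id not in branches_access_events:
--             branches_access_events[branch_id] = True
--             code_cost += WITNESS_BRANCH_COST
--
--     for [storage_key_hex, _] in contract_slots.items():
--         # storage_cost -= COLD_SLOAD_COST  # uncomment if Verkle replaces EIP-2929 warm/cold gas pricing
--         storage_cost += WITNESS_CHUNK_COST
--         storage_key = int(storage_key_hex, 16)
--         # special storage for slots 0..64
--         if storage_key < (CODE_OFFSET - HEADER_STORAGE_OFFSET):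
--             pos = HEADER_STORAGE_OFFSET + storage_key
--         else:
--             pos = MAIN_STORAGE_OFFSET + storage_key
--         branch_id = pos // VERKLE_NODE_WIDTH
--         if branch_id not in branches_access_events:
--             branches_access_events[branch_id] = True
--             storage_cost += WITNESS_BRANCH_COST
--
--     return [code_cost, storage_cost]
-- ===== SOURCE B (Python) =====
-- HEADER_STORAGE_OFFSET = 64
-- CODE_OFFSET = 128
-- VERKLE_NODE_WIDTH = 256
-- MAIN_STORAGE_OFFSET = 256 ** 31
-- WITNESS_BRANCH_COST = 1900
-- WITNESS_CHUNK_COST = 200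
--
-- def _slot_branch(storage_key_hex):
--     storage_key = int(storage_key_hex, 16)
--     if storage_key < (CODE_OFFSET - HEADER_STORAGE_OFFSET):
--         pos = HEADER_STORAGE_OFFSET + storage_key
--     else:
--         pos = MAIN_STORAGE_OFFSET + storage_key
--     return pos // VERKLE_NODE_WIDTH
--
-- def calculate_gas_effect(contract_chunks, contract_slots):
--     # One combined stream of branch ids: the free "main code" branch 0, then the
--     # code-chunk branches, then the storage-slot branches.  Each cost is priced in
--     # closed form from the number of DISTINCT branch ids in a prefix of the stream:
--     # a branch is charged in the phase where it first appears.
--     combined = [0] + [chunk // 256 for chunk in contract_chunks] \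
--                    + [_slot_branch(h) for h in contract_slots]
--     n = len(contract_chunks)
--     d1 = len(set(combined[:n + 1]))   # distinct branches after the code phase (incl. free branch 0)
--     d2 = len(set(combined))           # distinct branches overall
--     return [WITNESS_CHUNK_COST * n + WITNESS_BRANCH_COST * (d1 - 1),
--             WITNESS_CHUNK_COST * len(contract_slots) + WITNESS_BRANCH_COST * (d2 - d1)]
-- ===== Notes on version B (the rewrite author's own statement) =====
-- stated objective: alternative
-- what changed: Replaces A's incremental cost accumulation with a membership-checking dict by a single combined branch-id stream ([0] ++ code branches ++ storage branches) priced in closed form from two prefix distinct-counts: code pays 1900*(|set(prefix)|-1), storage pays 1900*(|set(all)|-|set(prefix)|), so no seen-set updates or per-element branch-cost branches remain.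
import Mathlib
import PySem

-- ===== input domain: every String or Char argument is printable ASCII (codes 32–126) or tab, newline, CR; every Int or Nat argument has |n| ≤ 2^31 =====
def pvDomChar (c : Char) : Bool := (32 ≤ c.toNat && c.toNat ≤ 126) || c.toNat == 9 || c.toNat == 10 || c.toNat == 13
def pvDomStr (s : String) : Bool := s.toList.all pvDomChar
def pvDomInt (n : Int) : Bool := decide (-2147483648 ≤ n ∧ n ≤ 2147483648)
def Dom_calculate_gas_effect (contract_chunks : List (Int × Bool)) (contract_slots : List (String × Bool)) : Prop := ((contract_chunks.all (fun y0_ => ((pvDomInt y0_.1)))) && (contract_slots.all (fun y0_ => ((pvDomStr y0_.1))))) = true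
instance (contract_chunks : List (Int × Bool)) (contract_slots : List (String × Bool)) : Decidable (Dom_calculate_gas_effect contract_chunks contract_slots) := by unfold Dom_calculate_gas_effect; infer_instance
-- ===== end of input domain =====

-- B replaces A's incremental cost accumulation with a seen-branches dict by one combined branch-id
-- stream priced in closed form from two prefix distinct-counts; objective: alternative.

-- ===== PORT A =====
-- branch id of a storage slot hex key (the slot-key arithmetic both Pythons share, kept as a helper)
def pvSlotBranch (storage_key_hex : String) : Int :=
  let storage_key := (PySem.Int.ofStrBase? storage_key_hex 16).getD 0  -- Pre_ guarantees int(s,16) succeeds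
  let pos := if storage_key < (128 - 64) then 64 + storage_key else 256 ^ 31 + storage_key
  PySem.Int.floordiv pos 256

def calculate_gas_effect (contract_chunks : List (Int × Bool)) (contract_slots : List (String × Bool)) : List Int :=
  let r1 := contract_chunks.foldl
    (fun (s : Int × PySem.Dict Int Bool) p =>
      let code_cost := s.1 + 200
      let branch_id := PySem.Int.floordiv p.1 256
      if s.2.contains branch_id then (code_cost, s.2)
      else (code_cost + 1900, s.2.insert branch_id true))
    (0, (PySem.Dict.empty : PySem.Dict Int Bool).insert 0 true)
  let r2 := contract_slots.foldl
    (fun (s : Int × PySem.Dict Int Bool) p =>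
      let storage_cost := s.1 + 200
      let branch_id := pvSlotBranch p.1
      if s.2.contains branch_id then (storage_cost, s.2)
      else (storage_cost + 1900, s.2.insert branch_id true))
    (0, r1.2)
  [r1.1, r2.1]

-- ===== PORT B =====
def calculate_gas_effect_alt (contract_chunks : List (Int × Bool)) (contract_slots : List (String × Bool)) : List Int :=
  let combined : List Int :=
    0 :: (contract_chunks.map (fun p => PySem.Int.floordiv p.1 256)
          ++ contract_slots.map (fun p => pvSlotBranch p.1))
  let n : Int := contract_chunks.length
  let d1 : Int := (PySem.Set.ofList (PySem.List.slice combined none (some (n + 1)))).length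
  let d2 : Int := (PySem.Set.ofList combined).length
  [200 * n + 1900 * (d1 - 1), 200 * (contract_slots.length : Int) + 1900 * (d2 - d1)]

-- ===== PRECONDITION & SPEC =====
-- Pre_ requires each mapping's keys to be distinct (the Python function receives dicts, which cannot
-- hold duplicate keys) and every storage key to be a valid base-16 int literal (else int(s,16) raises ValueError).
def Pre_calculate_gas_effect (contract_chunks : List (Int × Bool)) (contract_slots : List (String × Bool)) : Prop :=
  (contract_chunks.map (·.1)).Nodup ∧ (contract_slots.map (·.1)).Nodup ∧
  ∀ p ∈ contract_slots, (PySem.Int.ofStrBase? p.1 16).isSome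
instance (contract_chunks : List (Int × Bool)) (contract_slots : List (String × Bool)) : Decidable (Pre_calculate_gas_effect contract_chunks contract_slots) := by unfold Pre_calculate_gas_effect; infer_instance

def pvWitness_calculate_gas_effect : (List (Int × Bool)) × (List (String × Bool)) :=
  ([(0, true), (300, false)], [("1f", true), ("ff", false)])

def Spec_calculate_gas_effect (contract_chunks : List (Int × Bool)) (contract_slots : List (String × Bool)) (out : List Int) : Prop := out = calculate_gas_effect_alt contract_chunks contract_slots
instance (contract_chunks : List (Int × Bool)) (contract_slots : List (String × Bool)) (out : List Int) : Decidable (Spec_calculate_gas_effect contract_chunks contract_slots out) := by unfold Spec_calculate_gas_effect; infer_instance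

-- ===== CLAIM (what is proved, stated in full; the proofs are below) =====
def Claim_equal_calculate_gas_effect : Prop := ∀ (contract_chunks : List (Int × Bool)) (contract_slots : List (String × Bool)), Dom_calculate_gas_effect contract_chunks contract_slots → Pre_calculate_gas_effect contract_chunks contract_slots → Spec_calculate_gas_effect contract_chunks contract_slots (calculate_gas_effect contract_chunks contract_slots)

-- ===== LEMMAS AND PROOFS =====

-- A's cost+dict loop, abstracted: cost counts 200 per element plus 1900 per branch id new to the
-- key set, and the final key set is the set-update of the initial one by the branch ids.
theorem pvA_fold {α : Type} (f : α → Int) (l : List α) (c : Int) (d : PySem.Dict Int Bool) :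
    (l.foldl (fun (s : Int × PySem.Dict Int Bool) p =>
        let cost := s.1 + 200
        let branch_id := f p
        if s.2.contains branch_id then (cost, s.2)
        else (cost + 1900, s.2.insert branch_id true)) (c, d)).1
      = c + 200 * l.length
          + 1900 * (((PySem.Set.update d.keys (l.map f)).length : Int) - d.keys.length)
    ∧ (l.foldl (fun (s : Int × PySem.Dict Int Bool) p =>
        let cost := s.1 + 200
        let branch_id := f p
        if s.2.contains branch_id then (cost, s.2)
        else (cost + 1900, s.2.insert branch_id true)) (c, d)).2.keys
      = PySem.Set.update d.keys (l.map f) := by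
  induction l generalizing c d with
  | nil => simp [PySem.Set.update]
  | cons x l ih =>
    simp only [List.foldl_cons, List.map_cons, PySem.Set.update_cons]
    by_cases h : d.contains (f x) = true
    · have hm : f x ∈ d.keys := (PySem.Dict.contains_iff_mem_keys d (f x)).mp h
      rw [h]
      simp only [if_true]
      rw [PySem.Set.add_of_mem hm]
      obtain ⟨h1, h2⟩ := ih (c + 200) d
      refine ⟨?_, h2⟩
      rw [h1]; push_cast [List.length_cons]; ring
    · have hm : f x ∉ d.keys := fun hmem => h ((PySem.Dict.contains_iff_mem_keys d (f x)).mpr hmem)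
      rw [Bool.not_eq_true] at h
      rw [h]
      simp only [Bool.false_eq_true, if_false]
      have hkeys : (d.insert (f x) true).keys = d.keys ++ [f x] := by
        apply PySem.Dict.keys_insert_of_not_contains
        exact h
      obtain ⟨h1, h2⟩ := ih (c + 200 + 1900) (d.insert (f x) true)
      rw [hkeys] at h1 h2
      rw [PySem.Set.add_of_not_mem hm]
      refine ⟨?_, h2⟩
      rw [h1]
      have hl : ((d.keys ++ [f x]).length : Int) = (d.keys.length : Int) + 1 := by simp
      rw [hl]; push_cast [List.length_cons]; ring

-- ===== VERDICT (by name: the statement is the Claim_ definition above) =====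
theorem calculate_gas_effect_spec : Claim_equal_calculate_gas_effect := by
  intro contract_chunks contract_slots _ _
  unfold Spec_calculate_gas_effect
  simp only [calculate_gas_effect, calculate_gas_effect_alt]
  have hd0 : ((PySem.Dict.empty : PySem.Dict Int Bool).insert 0 true).keys = [0] := rfl
  have hA1 := pvA_fold (fun (p : Int × Bool) => PySem.Int.floordiv p.1 256) contract_chunks 0
      ((PySem.Dict.empty : PySem.Dict Int Bool).insert 0 true)
  rw [hd0] at hA1
  have hA2 := pvA_fold (fun (p : String × Bool) => pvSlotBranch p.1) contract_slots 0
      ((contract_chunks.foldl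
        (fun (s : Int × PySem.Dict Int Bool) p =>
          let cost := s.1 + 200
          let branch_id := PySem.Int.floordiv p.1 256
          if s.2.contains branch_id then (cost, s.2)
          else (cost + 1900, s.2.insert branch_id true))
        (0, (PySem.Dict.empty : PySem.Dict Int Bool).insert 0 true)).2)
  rw [hA1.2] at hA2
  set bs := contract_chunks.map (fun p : Int × Bool => PySem.Int.floordiv p.1 256) with hbs
  set ss := contract_slots.map (fun p : String × Bool => pvSlotBranch p.1) with hss
  -- B's prefix combined[:n+1] is exactly [0] ++ bs
  have hslice : PySem.List.slice (0 :: (bs ++ ss)) none (some ((contract_chunks.length : Int) + 1))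
      = 0 :: bs := by
    have h1 : ((contract_chunks.length : Int) + 1) = ((contract_chunks.length + 1 : Nat) : Int) := by
      push_cast; ring
    rw [h1, PySem.List.slice_to_natCast]
    have hlen : bs.length = contract_chunks.length := by rw [hbs]; simp
    simp [hlen]
  -- B's distinct counts are the lengths of A's final key sets
  have hofl1 : PySem.Set.ofList (0 :: bs) = PySem.Set.update ([0] : PySem.Set Int) bs := by
    have : (0 : Int) :: bs = [0] ++ bs := rfl
    rw [this, PySem.Set.ofList_append]; rfl
  have hofl2 : PySem.Set.ofList (0 :: (bs ++ ss))
      = PySem.Set.update (PySem.Set.update ([0] : PySem.Set Int) bs) ss := by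
    have : (0 : Int) :: (bs ++ ss) = ([0] ++ bs) ++ ss := by simp
    rw [this, PySem.Set.ofList_append, PySem.Set.ofList_append]; rfl
  rw [hA1.1, hA2.1]
  simp only [hslice, hofl1, hofl2, List.length_singleton, Nat.cast_one, List.cons.injEq, and_true]
  constructor
  · ring
  · ring
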